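-- pv_equiv track=rewrite | github.com/paulitzlinger/griddiagrams | src/griddiagrams/core.py | hlist
-- ===== SOURCE A (Python) =====
-- from typing import List, Tuple, Optional, Dict, Set, Union
--
-- GridList = List[int]
--
-- HorzList = List[Tuple[int, int]]
--
-- def hlist(gridlist: GridList) -> HorzList:
--     """
--     Convert grid list to horizontal segment list.
--
--     Parameters
--     ----------
--     gridlist : List[int]
--         Grid list representation.
--
--     Returns
--     -------
--     List[Tuple[int, int]]
--         List of tuples representing oriented horizontal segments.
--     """
--
--     extended_grid = gridlist.copy()
--     extended_grid.extend([gridlist[0], gridlist[1]])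
--
--     n = len(extended_grid)
--     x = n + 1
--     hsegments: List[Optional[Tuple[int, int]]] = [None] * (2 * n + 1)
--     hsegments[x] = (extended_grid[1], extended_grid[3])
--
--     for i in range(3, len(extended_grid) - 2, 2):
--         x = x + extended_grid[i + 1] - extended_grid[i - 1]
--         if 0 <= x < len(hsegments):
--             hsegments[x] = (extended_grid[i], extended_grid[i + 2])
--         else:
--             raise IndexError("Calculated index is out of bounds!")
--
--     # Filter out None values and return
--     return [seg for seg in hsegments if seg is not None]
-- ===== SOURCE B (Python) =====
-- def hlist(gridlist):
--     """
--     Convert grid list to horizontal segment list.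
--
--     The running x of the reference implementation telescopes: the segment
--     produced at loop index i lands at position (constant + eg[i+1]), so the
--     output order (ascending array position) is simply ascending eg[i+1], with
--     later loop iterations overwriting earlier ones at equal positions.  So:
--     build the (key, segment) pairs directly, walk them from the END keeping
--     the first (i.e. latest) segment per key with a seen-set, and sort the
--     surviving pairs by key.
--     """
--     eg = gridlist + gridlist[:2]
--     pairs = [(eg[i + 1], (eg[i], eg[i + 2])) for i in range(1, len(eg) - 2, 2)]
--     seen = set()
--     winners = []
--     for key, seg in reversed(pairs):
--         if key not in seen:
--             seen.add(key)
--             winners.append((key, seg))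
--     winners.sort(key=lambda p: p[0])
--     return [seg for _, seg in winners]
-- ===== Notes on version B (the rewrite author's own statement) =====
-- stated objective: alternative
-- what changed: A accumulates a running x and scatter-writes segments into a sparse size-(2n+1) array, then filters out the Nones; B never tracks a position or an array at all: it builds (key, segment) pairs directly from the grid (the running x telescopes to a constant plus the grid entry after i, so ascending position = ascending key), resolves overwrites by a reversed pass with a seen-set keeping the latest segment per key, and sorts the distinct survivors by key.
import Mathlib
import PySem

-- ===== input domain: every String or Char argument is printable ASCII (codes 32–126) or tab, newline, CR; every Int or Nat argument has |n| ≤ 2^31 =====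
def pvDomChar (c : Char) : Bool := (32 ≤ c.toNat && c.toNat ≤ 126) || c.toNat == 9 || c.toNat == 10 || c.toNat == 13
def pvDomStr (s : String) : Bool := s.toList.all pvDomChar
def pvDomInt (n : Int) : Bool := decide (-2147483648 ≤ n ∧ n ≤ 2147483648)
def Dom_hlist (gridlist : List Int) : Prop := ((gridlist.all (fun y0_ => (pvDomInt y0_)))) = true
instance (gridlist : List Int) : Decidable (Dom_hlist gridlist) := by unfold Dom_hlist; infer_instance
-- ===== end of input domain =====

-- B drops A's running position and sparse array entirely: it keys each segment by the
-- grid entry after its index (the telescoped position minus a constant), keeps the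
-- latest segment per key by a reversed pass with a seen-set, and sorts by key
-- (objective: alternative).

-- ===== PORT A =====
-- A-side helper: the body of A's for-loop (state: `some (x, hsegments)`;
-- `none` is the raised IndexError, excluded by Pre_hlist).  pyGetD defaults
-- are never consulted: every index is in range whenever the branch is reached.
def stepA (eg : List Int) (st : Option (Int × List (Option (Int × Int)))) (i : Int) :
    Option (Int × List (Option (Int × Int))) :=
  match st with
  | none => none
  | some (x, hseg) =>
    let x := x + PySem.List.pyGetD eg (i + 1) 0 - PySem.List.pyGetD eg (i - 1) 0
    if 0 ≤ x ∧ x < PySem.List.len hseg then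
      some (x, PySem.List.pySetD hseg x
        (some (PySem.List.pyGetD eg i 0, PySem.List.pyGetD eg (i + 2) 0)))
    else none

def hlist (gridlist : List Int) : List (Int × Int) :=
  match PySem.List.pyGet? gridlist 0, PySem.List.pyGet? gridlist 1 with
  | some g0, some g1 =>
    let extended_grid := gridlist ++ [g0, g1]
    let n : Nat := extended_grid.length
    let x0 : Int := (n : Int) + 1
    let hsegments : List (Option (Int × Int)) :=
      PySem.List.pySetD (List.replicate (2 * n + 1) (none : Option (Int × Int))) x0
        (some (PySem.List.pyGetD extended_grid 1 0, PySem.List.pyGetD extended_grid 3 0))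
    let res := (PySem.List.pyRange 3 (PySem.List.len extended_grid - 2) 2).foldl
      (stepA extended_grid) (some (x0, hsegments))
    match res with
    | some (_, hseg) => hseg.filterMap id
    | none => []
  | _, _ => []

-- ===== PORT B =====
-- B-side helper: the body of B's reversed-dedup loop (seen-set + winners list).
def dedupStep (st : PySem.Set Int × List (Int × (Int × Int))) (p : Int × (Int × Int)) :
    PySem.Set Int × List (Int × (Int × Int)) :=
  if p.1 ∈ st.1 then st else (PySem.Set.add st.1 p.1, st.2 ++ [p])

-- Literal transliteration of B: keyed pairs built by a comprehension (every index the
-- range produces is in bounds, so pyGetD's default is never consulted), reversed pass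
-- keeping the first (= latest) segment per key, then a sort by key.
def hlist_alt (gridlist : List Int) : List (Int × Int) :=
  let eg := gridlist ++ PySem.List.slice gridlist none (some 2)
  let pairs := (PySem.List.pyRange 1 (PySem.List.len eg - 2) 2).map
    (fun i => (PySem.List.pyGetD eg (i + 1) 0,
      (PySem.List.pyGetD eg i 0, PySem.List.pyGetD eg (i + 2) 0)))
  let st := pairs.reverse.foldl dedupStep ((PySem.Set.empty : PySem.Set Int), [])
  (PySem.List.sorted st.2 (fun p => p.1)).map (fun p => p.2)

-- ===== PRECONDITION & SPEC =====
-- shared abbreviation for the extended grid (used by Pre_hlist and the proofs)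
def egOf (gl : List Int) : List Int := gl ++ gl.take 2

-- Pre_hlist is exactly where Python A returns: gridlist has at least 2 elements
-- (otherwise indexing gridlist raises IndexError) and every running x of the
-- loop — which telescopes to len+3 - eg.getD 2 + eg.getD (2*j) — stays within
-- the bounds 0 and 2*len+5 (otherwise the loop raises IndexError).
def Pre_hlist (gridlist : List Int) : Prop :=
  2 ≤ gridlist.length ∧
  ∀ j : Nat, j < gridlist.length → 2 ≤ j → 2 * j ≤ gridlist.length →
    0 ≤ (gridlist.length : Int) + 3 - (egOf gridlist).getD 2 0 + (egOf gridlist).getD (2 * j) 0 ∧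
    (gridlist.length : Int) + 3 - (egOf gridlist).getD 2 0 + (egOf gridlist).getD (2 * j) 0
      < 2 * (gridlist.length : Int) + 5
instance (gridlist : List Int) : Decidable (Pre_hlist gridlist) := by
  unfold Pre_hlist; infer_instance

def pvWitness_hlist : List Int := [1, 0, 3, 2, 5, 4]

def Spec_hlist (gridlist : List Int) (out : List (Int × Int)) : Prop := out = hlist_alt gridlist
instance (gridlist : List Int) (out : List (Int × Int)) : Decidable (Spec_hlist gridlist out) := by
  unfold Spec_hlist; infer_instance

-- ===== CLAIM (what is proved, stated in full; the proofs are below) =====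
def Claim_equal_hlist : Prop :=
  ∀ (gridlist : List Int), Dom_hlist gridlist → Pre_hlist gridlist →
    Spec_hlist gridlist (hlist gridlist)

-- ===== LEMMAS AND PROOFS =====

def lastW (ws : List (Int × (Int × Int))) (k : Int) : Option (Int × Int) :=
  ws.foldl (fun acc p => if p.1 = k then some p.2 else acc) none
def arrOf (N : Nat) (ws : List (Int × (Int × Int))) : List (Option (Int × Int)) :=
  ws.foldl (fun a p => a.set p.1.toNat (some p.2)) (List.replicate N none)
def dictOf (ws : List (Int × (Int × Int))) : PySem.Dict Int (Int × Int) :=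
  ws.foldl (fun d p => d.insert p.1 p.2) PySem.Dict.empty

theorem lastW_append (ws : List (Int × (Int × Int))) (p : Int × (Int × Int)) (k : Int) :
    lastW (ws ++ [p]) k = if p.1 = k then some p.2 else lastW ws k := by
  simp [lastW, List.foldl_append]

theorem dictOf_get? (ws : List (Int × (Int × Int))) (k : Int) :
    (dictOf ws).get? k = lastW ws k := by
  induction ws using List.reverseRecOn with
  | nil => simp [dictOf, lastW, PySem.Dict.get?_empty]
  | append_singleton ws p ih =>
    rw [lastW_append]
    have : dictOf (ws ++ [p]) = (dictOf ws).insert p.1 p.2 := by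
      simp [dictOf, List.foldl_append]
    rw [this, PySem.Dict.get?_insert, ih]
    by_cases h : k = p.1
    · simp [h]
    · simp [h, Ne.symm h]

theorem dictOf_keys (ws : List (Int × (Int × Int))) :
    (dictOf ws).keys = PySem.Set.ofList (ws.map (·.1)) := by
  have := PySem.Dict.keys_foldl_insert_key ws (fun p => p.1) (fun _ p => p.2) (PySem.Dict.empty : PySem.Dict Int (Int × Int))
  simpa [dictOf, PySem.Dict.keys_empty, PySem.Set.update_empty] using this

theorem arrOf_length (N : Nat) (ws : List (Int × (Int × Int))) :
    (arrOf N ws).length = N := by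
  induction ws using List.reverseRecOn with
  | nil => simp [arrOf]
  | append_singleton ws p ih => simp [arrOf, List.foldl_append] at ih ⊢; omega

theorem arrOf_getElem? (N : Nat) (ws : List (Int × (Int × Int)))
    (h : ∀ p ∈ ws, 0 ≤ p.1 ∧ p.1 < (N : Int)) (j : Nat) (hj : j < N) :
    (arrOf N ws)[j]? = some (lastW ws (j : Int)) := by
  induction ws using List.reverseRecOn with
  | nil => simp [arrOf, lastW, hj]
  | append_singleton ws p ih =>
    have hp := h p (by simp)
    have hws : ∀ q ∈ ws, 0 ≤ q.1 ∧ q.1 < (N : Int) := fun q hq => h q (by simp [hq])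
    have harr : arrOf N (ws ++ [p]) = (arrOf N ws).set p.1.toNat (some p.2) := by
      simp [arrOf, List.foldl_append]
    rw [harr, lastW_append, List.getElem?_set]
    by_cases hk : p.1 = (j : Int)
    · have ht : p.1.toNat = j := by omega
      simp [hk, arrOf_length, hj]
    · have hne : p.1.toNat ≠ j := by omega
      simp only [if_neg hne, if_neg hk]
      exact ih hws

theorem arr_eq_map (N : Nat) (ws : List (Int × (Int × Int)))
    (h : ∀ p ∈ ws, 0 ≤ p.1 ∧ p.1 < (N : Int)) :
    arrOf N ws = (List.range N).map (fun (j : Nat) => lastW ws (j : Int)) := by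
  apply List.ext_getElem?
  intro i
  by_cases hi : i < N
  · rw [arrOf_getElem? N ws h i hi]
    simp [hi]
  · rw [List.getElem?_eq_none, List.getElem?_eq_none]
    · simp; omega
    · rw [arrOf_length]; omega

theorem lookup_list (d : PySem.Dict Int (Int × Int)) (l : List Nat) :
    l.filterMap (fun (j : Nat) => d.get? (j : Int))
      = (l.filter (fun (j : Nat) => decide ((j : Int) ∈ d.keys))).map
          (fun (j : Nat) => d.getD (j : Int) (0, 0)) := by
  induction l with
  | nil => simp
  | cons j l ih =>
    cases hd : d.get? (j : Int) with
    | none =>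
      have hnm : (j : Int) ∉ d.keys := (PySem.Dict.get?_eq_none_iff_not_mem_keys d _).mp hd
      simp [hd, hnm, ih]
    | some v =>
      have hm : (j : Int) ∈ d.keys := by
        by_contra hc
        rw [(PySem.Dict.get?_eq_none_iff_not_mem_keys d _).mpr hc] at hd
        simp at hd
      have hg : d.getD (j : Int) (0, 0) = v := by
        rw [PySem.Dict.getD_eq_get?_getD, hd]; rfl
      simp [hd, hm, ih, hg]

theorem sorted_keys_eq (ws : List (Int × (Int × Int))) (N : Nat)
    (h : ∀ p ∈ ws, 0 ≤ p.1 ∧ p.1 < (N : Int)) :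
    PySem.List.sorted (dictOf ws).keys (fun k => k)
      = ((List.range N).filter (fun (j : Nat) => decide ((j : Int) ∈ (dictOf ws).keys))).map
          (fun (j : Nat) => (j : Int)) := by
  have hxs : (dictOf ws).keys.Nodup := by
    rw [dictOf_keys]; exact PySem.Set.nodup_ofList _
  have hys : (((List.range N).filter (fun (j : Nat) => decide ((j : Int) ∈ (dictOf ws).keys))).map
      (fun (j : Nat) => (j : Int))).Nodup := by
    exact (List.nodup_range.filter _).map (fun a b hab => by omega)
  apply PySem.List.sorted_eq_of_perm_of_pairwise_lt
  · rw [List.perm_ext_iff_of_nodup hys hxs]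
    intro a
    simp only [List.mem_map, List.mem_filter, List.mem_range, decide_eq_true_eq]
    constructor
    · rintro ⟨j, ⟨_, hj⟩, rfl⟩; exact hj
    · intro ha
      have hb : 0 ≤ a ∧ a < (N : Int) := by
        rw [dictOf_keys, PySem.Set.mem_ofList] at ha
        obtain ⟨p, hp, rfl⟩ := List.mem_map.mp ha
        exact h p hp
      exact ⟨a.toNat, ⟨by omega, by rw [Int.toNat_of_nonneg hb.1]; exact ha⟩,
        Int.toNat_of_nonneg hb.1⟩
  · apply List.Pairwise.map
    · intro a b hab
      exact hab
    · have hpw : (List.range N).Pairwise (fun (a b : Nat) => (a : Int) < (b : Int)) := by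
        apply List.Pairwise.imp _ List.pairwise_lt_range
        intro a b hab; exact_mod_cast hab
      exact hpw.sublist List.filter_sublist

theorem core (ws : List (Int × (Int × Int))) (N : Nat)
    (h : ∀ p ∈ ws, 0 ≤ p.1 ∧ p.1 < (N : Int)) :
    (arrOf N ws).filterMap id
      = (PySem.List.sorted (dictOf ws).keys (fun k => k)).map
          (fun k => (dictOf ws).getD k (0, 0)) := by
  rw [arr_eq_map N ws h, List.filterMap_map, sorted_keys_eq ws N h, List.map_map]
  have hfun : (id ∘ fun (j : Nat) => lastW ws (j : Int))
      = fun (j : Nat) => (dictOf ws).get? (j : Int) := by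
    funext j; simp [dictOf_get?]
  rw [hfun, lookup_list]
  simp [Function.comp]

-- the canonical form both evaluations are reduced to
def canonOf (ws : List (Int × (Int × Int))) : List (Int × Int) :=
  (PySem.List.sorted (PySem.Set.ofList (ws.map (·.1))) (fun k => k)).map
    (fun k => (lastW ws k).getD (0, 0))

theorem core_canon (ws : List (Int × (Int × Int))) (N : Nat)
    (h : ∀ p ∈ ws, 0 ≤ p.1 ∧ p.1 < (N : Int)) :
    (arrOf N ws).filterMap id = canonOf ws := by
  rw [core ws N h, canonOf, ← dictOf_keys]
  apply List.map_congr_left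
  intro k _
  rw [PySem.Dict.getD_eq_get?_getD, dictOf_get?]

def wfOf (gl : List Int) (k : Nat) : Int × (Int × Int) :=
  (((egOf gl).length : Int) + 1 - (egOf gl).getD 2 0 + (egOf gl).getD (2 * k + 2) 0,
   ((egOf gl).getD (2 * k + 1) 0, (egOf gl).getD (2 * k + 3) 0))

def wsOf (gl : List Int) : List (Int × (Int × Int)) :=
  (List.range (((egOf gl).length - 2) / 2)).map (wfOf gl)

theorem egOf_length (gl : List Int) (hlen : 2 ≤ gl.length) :
    (egOf gl).length = gl.length + 2 := by
  unfold egOf; simp [List.length_take]; omega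

theorem keys_bounded (gl : List Int) (hpre : Pre_hlist gl) :
    ∀ p ∈ wsOf gl, 0 ≤ p.1 ∧ p.1 < 2 * ((egOf gl).length : Int) + 1 := by
  obtain ⟨hlen, hbound⟩ := hpre
  have hL := egOf_length gl hlen
  intro p hp
  obtain ⟨k, hk, rfl⟩ := List.mem_map.mp hp
  rw [List.mem_range] at hk
  rw [hL] at hk
  have hk' : k < gl.length / 2 := by omega
  rcases Nat.eq_zero_or_pos k with hk0 | hkpos
  · subst hk0
    unfold wfOf
    rw [hL]
    norm_num
    omega
  · have hj1 : k + 1 < gl.length := by omega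
    have hj2 : 2 ≤ k + 1 := by omega
    have hj3 : 2 * (k + 1) ≤ gl.length := by omega
    have hb := hbound (k + 1) hj1 hj2 hj3
    unfold wfOf
    rw [hL]
    have he : 2 * (k + 1) = 2 * k + 2 := by omega
    rw [he] at hb
    omega

theorem wf_fst (gl : List Int) (k : Nat) :
    (wfOf gl k).1 = ((egOf gl).length : Int) + 1 - (egOf gl).getD 2 0
      + (egOf gl).getD (2 * k + 2) 0 := rfl

theorem arrOf_append_singleton (N : Nat) (ws : List (Int × (Int × Int))) (p : Int × (Int × Int)) :
    arrOf N (ws ++ [p]) = (arrOf N ws).set p.1.toNat (some p.2) := by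
  simp [arrOf, List.foldl_append]

theorem A_loop (gl : List Int) (hlen : 2 ≤ gl.length)
    (hkb : ∀ p ∈ wsOf gl, 0 ≤ p.1 ∧ p.1 < 2 * ((egOf gl).length : Int) + 1) :
    ∀ m, m ≤ gl.length / 2 - 1 →
    ((List.range m).map (fun (k : Nat) => (3 : Int) + 2 * (k : Int))).foldl (stepA (egOf gl))
        (some ((wfOf gl 0).1, arrOf (2 * (egOf gl).length + 1) ((List.range 1).map (wfOf gl))))
      = some ((wfOf gl m).1, arrOf (2 * (egOf gl).length + 1) ((List.range (m + 1)).map (wfOf gl))) := by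
  have hL := egOf_length gl hlen
  intro m
  induction m with
  | zero => intro _; rfl
  | succ m ih =>
    intro hm
    rw [show List.range (m+1) = List.range m ++ [m] from List.range_succ,
        List.map_append, List.foldl_append, ih (by omega)]
    have hmem : wfOf gl (m + 1) ∈ wsOf gl := by
      unfold wsOf
      exact List.mem_map_of_mem (by rw [List.mem_range]; omega)
    have hb := hkb _ hmem
    simp only [List.foldl_cons, List.foldl_nil, List.map_cons, List.map_nil]
    show stepA (egOf gl)
        (some ((wfOf gl m).1, arrOf (2 * (egOf gl).length + 1) ((List.range (m + 1)).map (wfOf gl))))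
        ((3 : Int) + 2 * (m : Int)) = _
    unfold stepA
    simp only []
    have h1 : (3 : Int) + 2 * (m : Int) + 1 = ((2 * m + 4 : Nat) : Int) := by push_cast; ring
    have h2 : (3 : Int) + 2 * (m : Int) - 1 = ((2 * m + 2 : Nat) : Int) := by push_cast; ring
    have h3 : (3 : Int) + 2 * (m : Int) = ((2 * m + 3 : Nat) : Int) := by push_cast; ring
    have h4 : ((2 * m + 3 : Nat) : Int) + 2 = ((2 * m + 5 : Nat) : Int) := by push_cast; ring
    rw [h1, h2]
    rw [PySem.List.pyGetD_natCast, PySem.List.pyGetD_natCast]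
    have hx : (wfOf gl m).1 + (egOf gl).getD (2 * m + 4) 0 - (egOf gl).getD (2 * m + 2) 0
        = (wfOf gl (m + 1)).1 := by
      rw [wf_fst, wf_fst]
      have : 2 * (m + 1) + 2 = 2 * m + 4 := by omega
      rw [this]; ring
    rw [hx]
    have hlenarr : PySem.List.len (arrOf (2 * (egOf gl).length + 1) ((List.range (m + 1)).map (wfOf gl)))
        = 2 * ((egOf gl).length : Int) + 1 := by
      rw [PySem.List.len_eq, arrOf_length]; push_cast; ring
    rw [hlenarr, if_pos hb]
    rw [h3, h4, PySem.List.pyGetD_natCast, PySem.List.pyGetD_natCast]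
    rw [PySem.List.pySetD_of_nonneg _ _ hb.1]
    congr 1
    rw [show List.range (m+1+1) = List.range (m+1) ++ [m+1] from List.range_succ,
        List.map_append]
    simp only [List.map_cons, List.map_nil]
    rw [arrOf_append_singleton]
    unfold wfOf
    simp only [show 2*(m+1)+1 = 2*m+3 from by omega, show 2*(m+1)+3 = 2*m+5 from by omega,
      show 2*(m+1)+2 = 2*m+4 from by omega]

theorem A_eval (gl : List Int) (hpre : Pre_hlist gl) :
    hlist gl = (arrOf (2 * (egOf gl).length + 1) (wsOf gl)).filterMap id := by
  have hkb := keys_bounded gl hpre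
  obtain ⟨hlen, -⟩ := hpre
  have hL := egOf_length gl hlen
  rcases gl with - | ⟨a, - | ⟨b, t⟩⟩
  · simp at hlen
  · simp at hlen
  have hg0 : PySem.List.pyGet? (a :: b :: t) (0 : Int) = some a := by
    simp [PySem.List.pyGet?_zero_cons]
  have hg1 : PySem.List.pyGet? (a :: b :: t) (1 : Int) = some b := by
    simp [PySem.List.pyGet?, PySem.List.pyIdx?]
  have hegdef : (a :: b :: t) ++ [a, b] = egOf (a :: b :: t) := by simp [egOf]
  simp only [hlist, hg0, hg1]
  rw [hegdef]
  have hbnd : PySem.List.len (egOf (a :: b :: t)) - 2 = ((a :: b :: t).length : Int) := by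
    rw [PySem.List.len_eq, hL]; push_cast; ring
  rw [hbnd]
  have hr : PySem.List.pyRange 3 (((a :: b :: t).length : Nat) : Int) 2
      = (List.range ((a :: b :: t).length / 2 - 1)).map (fun (k : Nat) => (3 : Int) + 2 * (k : Int)) := by
    rw [PySem.List.pyRange_of_pos _ _ (by norm_num : (0:Int) < 2)]
    have hco : (if (3 : Int) < (((a :: b :: t).length : Nat) : Int)
        then (((((a :: b :: t).length : Nat) : Int) - 3 + 2 - 1) / 2).toNat else 0)
        = (a :: b :: t).length / 2 - 1 := by
      split_ifs with h <;> omega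
    rw [hco]
  rw [hr]
  have hx0 : (((egOf (a :: b :: t)).length : Int) + 1) = (wfOf (a :: b :: t) 0).1 := by
    rw [wf_fst]; norm_num
  have hws1 : (List.range 1).map (wfOf (a :: b :: t)) = [wfOf (a :: b :: t) 0] := by simp
  have hinit : PySem.List.pySetD
        (List.replicate (2 * (egOf (a :: b :: t)).length + 1) (none : Option (Int × Int)))
        (((egOf (a :: b :: t)).length : Int) + 1)
        (some (PySem.List.pyGetD (egOf (a :: b :: t)) 1 0, PySem.List.pyGetD (egOf (a :: b :: t)) 3 0))
      = arrOf (2 * (egOf (a :: b :: t)).length + 1) ((List.range 1).map (wfOf (a :: b :: t))) := by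
    rw [PySem.List.pySetD_of_nonneg _ _ (by positivity), hws1]
    have harr1 : arrOf (2 * (egOf (a :: b :: t)).length + 1) [wfOf (a :: b :: t) 0]
        = (List.replicate (2 * (egOf (a :: b :: t)).length + 1) none).set
            (wfOf (a :: b :: t) 0).1.toNat (some (wfOf (a :: b :: t) 0).2) := by
      simp [arrOf]
    rw [harr1, ← hx0]
    have hval : (some (PySem.List.pyGetD (egOf (a :: b :: t)) 1 0,
          PySem.List.pyGetD (egOf (a :: b :: t)) 3 0) : Option (Int × Int))
        = some (wfOf (a :: b :: t) 0).2 := by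
      unfold wfOf
      rw [PySem.List.pyGetD_ofNat', PySem.List.pyGetD_ofNat']
    rw [hval]
  rw [hinit, hx0]
  rw [A_loop (a :: b :: t) hlen hkb ((a :: b :: t).length / 2 - 1) le_rfl]
  have hws : (List.range ((a :: b :: t).length / 2 - 1 + 1)).map (wfOf (a :: b :: t))
      = wsOf (a :: b :: t) := by
    unfold wsOf
    congr 2
    rw [hL]
    omega
  rw [hws]

-- ===== B-side machinery =====

-- B's pairs, with the raw key eg[2k+2] (= A's position minus the constant shift)
def wgOf (gl : List Int) (k : Nat) : Int × (Int × Int) :=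
  ((egOf gl).getD (2 * k + 2) 0,
   ((egOf gl).getD (2 * k + 1) 0, (egOf gl).getD (2 * k + 3) 0))

def wsB (gl : List Int) : List (Int × (Int × Int)) :=
  (List.range (((egOf gl).length - 2) / 2)).map (wgOf gl)

-- reference version of the reversed-dedup loop: keep the first pair per key
def dedupKey : List (Int × (Int × Int)) → List (Int × (Int × Int))
  | [] => []
  | p :: t => p :: dedupKey (t.filter (fun q => decide (q.1 ≠ p.1)))
  termination_by l => l.length
  decreasing_by
    simp only [List.length_unattach]
    exact Nat.lt_succ_of_le (le_trans (List.length_filter_le _ _) (by simp))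

theorem dedupKey_unattach (t : List (Int × (Int × Int))) (p : Int × (Int × Int)) :
    (List.filter (fun x => match x with | ⟨q, _⟩ => decide (q.1 ≠ p.1)) t.attach).unattach
      = t.filter (fun q => decide (q.1 ≠ p.1)) := by
  rw [List.unattach_filter (g := fun q => decide (q.1 ≠ p.1)) (hf := fun x h => rfl),
    List.unattach_attach]

theorem dedupKey_ind (motive : List (Int × (Int × Int)) → Prop)
    (h1 : motive [])
    (h2 : ∀ p t, motive (t.filter (fun q => decide (q.1 ≠ p.1))) → motive (p :: t)) :
    ∀ l, motive l := by
  intro l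
  induction l using dedupKey.induct with
  | case1 => exact h1
  | case2 p t ih =>
    apply h2
    rwa [dedupKey_unattach] at ih

theorem dedup_fold (rs : List (Int × (Int × Int))) :
    ∀ (seen : PySem.Set Int) (acc : List (Int × (Int × Int))),
    (rs.foldl dedupStep (seen, acc)).2
      = acc ++ dedupKey (rs.filter (fun p => decide (p.1 ∉ seen))) := by
  induction rs with
  | nil => intro seen acc; simp [dedupKey]
  | cons p t ih =>
    intro seen acc
    by_cases hp : p.1 ∈ seen
    · rw [List.foldl_cons]
      have hstep : dedupStep (seen, acc) p = (seen, acc) := by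
        simp [dedupStep, hp]
      rw [hstep, ih]
      simp [hp]
    · rw [List.foldl_cons]
      have hstep : dedupStep (seen, acc) p = (PySem.Set.add seen p.1, acc ++ [p]) := by
        simp [dedupStep, hp]
      rw [hstep, ih]
      have hfil : t.filter (fun q => decide (q.1 ∉ PySem.Set.add seen p.1))
          = (t.filter (fun q => decide (q.1 ∉ seen))).filter (fun q => decide (q.1 ≠ p.1)) := by
        rw [List.filter_filter]
        apply List.filter_congr
        intro q _
        by_cases h1 : q.1 ∈ seen <;> by_cases h2 : q.1 = p.1 <;>
          simp [PySem.Set.mem_add, h1, h2]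
      rw [hfil]
      simp [dedupKey, hp]

theorem mem_dedupKey (l : List (Int × (Int × Int))) (q : Int × (Int × Int)) :
    q ∈ dedupKey l → q ∈ l := by
  induction l using dedupKey_ind with
  | h1 => intro h; simpa [dedupKey] using h
  | h2 p t ih =>
    intro h
    rw [dedupKey, List.mem_cons] at h
    rcases h with h | h
    · simp [h]
    · right
      exact List.mem_of_mem_filter (ih h)

theorem keys_dedupKey_nodup (l : List (Int × (Int × Int))) :
    ((dedupKey l).map (·.1)).Nodup := by
  induction l using dedupKey_ind with
  | h1 => simp [dedupKey]
  | h2 p t ih =>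
    rw [dedupKey]
    simp only [List.map_cons, List.nodup_cons]
    refine ⟨?_, ih⟩
    intro hc
    obtain ⟨q, hq, hqk⟩ := List.mem_map.mp hc
    have := List.of_mem_filter (mem_dedupKey _ _ hq)
    simp at this
    exact this hqk

theorem mem_keys_dedupKey (l : List (Int × (Int × Int))) (k : Int) :
    k ∈ l.map (·.1) → k ∈ (dedupKey l).map (·.1) := by
  induction l using dedupKey_ind with
  | h1 => intro h; simpa using h
  | h2 p t ih =>
    intro h
    rw [dedupKey]
    simp only [List.map_cons, List.mem_cons]
    by_cases hk : k = p.1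
    · left; exact hk
    · right
      apply ih
      obtain ⟨q, hq, hqk⟩ := List.mem_map.mp h
      rw [List.mem_cons] at hq
      rcases hq with hq | hq
      · exact absurd (hq ▸ hqk).symm (by simpa using hk)
      · exact List.mem_map.mpr ⟨q, List.mem_filter.mpr ⟨hq, by simp [hqk, hk]⟩, hqk⟩

theorem find?_filter_ne (t : List (Int × (Int × Int))) (c k : Int) (h : k ≠ c) :
    (t.filter (fun q => decide (q.1 ≠ c))).find? (fun r => r.1 == k) = t.find? (fun r => r.1 == k) := by
  induction t with
  | nil => simp
  | cons r t ih =>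
    rw [List.filter_cons]
    by_cases hk : r.1 = k
    · have hrc : ¬ (r.1 = c) := by rw [hk]; exact h
      rw [if_pos (by simpa using hrc), List.find?_cons_of_pos (by simpa using hk),
        List.find?_cons_of_pos (by simpa using hk)]
    · by_cases hr : r.1 = c
      · rw [if_neg (by simpa using hr), List.find?_cons_of_neg (by simpa using hk), ih]
      · rw [if_pos (by simpa using hr), List.find?_cons_of_neg (by simpa using hk),
          List.find?_cons_of_neg (by simpa using hk), ih]

theorem dedupKey_find? (l : List (Int × (Int × Int))) (q : Int × (Int × Int)) :
    q ∈ dedupKey l → l.find? (fun r => r.1 == q.1) = some q := by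
  induction l using dedupKey_ind with
  | h1 => intro h; simp [dedupKey] at h
  | h2 p t ih =>
    intro h
    rw [dedupKey, List.mem_cons] at h
    rcases h with h | h
    · subst h
      simp [List.find?]
    · have hne : q.1 ≠ p.1 := by
        have := List.of_mem_filter (mem_dedupKey _ _ h)
        simpa using this
      have hfind := ih h
      rw [find?_filter_ne t p.1 q.1 hne] at hfind
      have hph : ¬ (p.1 == q.1) = true := by simp; exact fun hc => hne hc.symm
      simp [List.find?, hph, hfind]

def firstW (l : List (Int × (Int × Int))) (k : Int) : Option (Int × Int) :=
  (l.find? (fun r => r.1 == k)).map (·.2)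

theorem lastW_eq_firstW_reverse (l : List (Int × (Int × Int))) (k : Int) :
    lastW l k = firstW l.reverse k := by
  induction l using List.reverseRecOn with
  | nil => simp [lastW, firstW]
  | append_singleton l p ih =>
    rw [lastW_append, List.reverse_append]
    simp only [List.reverse_cons, List.reverse_nil, List.nil_append, List.cons_append]
    rw [firstW]
    by_cases hp : p.1 = k
    · simp [List.find?, hp]
    · have : ¬ (p.1 == k) = true := by simpa using hp
      simp [List.find?, this, hp, ih, firstW]

-- the sorted winners of B equal the canonical form of wsB
theorem B_sorted_eq_canon (ws : List (Int × (Int × Int))) :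
    (PySem.List.sorted (dedupKey ws.reverse) (fun p => p.1)).map (fun p => p.2)
      = canonOf ws := by
  set winners := dedupKey ws.reverse with hwdef
  set g : Int → Int × (Int × Int) := fun k => (k, (lastW ws k).getD (0, 0)) with hg
  have hval : ∀ q ∈ winners, g q.1 = q := by
    intro q hq
    have hf := dedupKey_find? _ _ hq
    have : lastW ws q.1 = some q.2 := by
      rw [lastW_eq_firstW_reverse, firstW, hf]; rfl
    simp [hg, this]
  have hwin : winners = (winners.map (·.1)).map g := by
    rw [List.map_map]
    conv_lhs => rw [← List.map_id winners]
    apply List.map_congr_left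
    intro q hq
    simp [Function.comp, hval q hq]
  set K' := PySem.List.sorted (PySem.Set.ofList (ws.map (·.1))) (fun k => k) with hK'
  have hsorted : PySem.List.sorted winners (fun p => p.1) = K'.map g := by
    apply PySem.List.sorted_eq_of_perm_of_pairwise_lt
    · -- K'.map g is a permutation of winners
      have hKperm : (winners.map (·.1)).Perm K' := by
        have hn1 : (winners.map (·.1)).Nodup := keys_dedupKey_nodup _
        have hn2 : K'.Nodup := by
          rw [hK']
          exact (PySem.List.sorted_perm _ _ _).symm.nodup (PySem.Set.nodup_ofList _)
        rw [List.perm_ext_iff_of_nodup hn1 hn2]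
        intro k
        have h1 : k ∈ winners.map (·.1) ↔ k ∈ ws.reverse.map (·.1) := by
          constructor
          · intro hk
            obtain ⟨q, hq, hqk⟩ := List.mem_map.mp hk
            exact List.mem_map.mpr ⟨q, mem_dedupKey _ _ hq, hqk⟩
          · exact mem_keys_dedupKey _ _
        have h2 : k ∈ K' ↔ k ∈ ws.map (·.1) := by
          rw [hK', PySem.List.mem_sorted, PySem.Set.mem_ofList]
        rw [h1, h2]
        constructor
        · intro hk
          obtain ⟨q, hq, rfl⟩ := List.mem_map.mp hk
          exact List.mem_map_of_mem (List.mem_reverse.mp hq)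
        · intro hk
          obtain ⟨q, hq, rfl⟩ := List.mem_map.mp hk
          exact List.mem_map_of_mem (List.mem_reverse.mpr hq)
      have h2 := (hKperm.map g).symm
      rw [← hwin] at h2
      exact h2
    · -- strictly increasing keys
      refine List.Pairwise.map _ ?_ (PySem.List.sorted_ofList_pairwise_lt _)
      intro a b hab
      exact hab
  rw [hsorted, canonOf, List.map_map]
  rfl

-- shift lemmas: wsOf's keys are wsB's keys plus a constant
theorem wsOf_eq_shift (gl : List Int) :
    wsOf gl = (wsB gl).map
      (fun p => (((egOf gl).length : Int) + 1 - (egOf gl).getD 2 0 + p.1, p.2)) := by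
  unfold wsOf wsB
  rw [List.map_map]
  apply List.map_congr_left
  intro k _
  rfl

theorem lastW_shift (ws : List (Int × (Int × Int))) (C k : Int) :
    lastW (ws.map (fun p => (C + p.1, p.2))) (C + k) = lastW ws k := by
  induction ws using List.reverseRecOn with
  | nil => simp [lastW]
  | append_singleton ws p ih =>
    rw [List.map_append]
    simp only [List.map_cons, List.map_nil]
    rw [lastW_append, lastW_append, ih]
    by_cases hp : p.1 = k
    · simp [hp]
    · have : ¬ (C + p.1 = C + k) := by omega
      simp [hp, this]

theorem sorted_keys_shift (ks : List Int) (C : Int) :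
    PySem.List.sorted (PySem.Set.ofList (ks.map (fun k => C + k))) (fun k => k)
      = (PySem.List.sorted (PySem.Set.ofList ks) (fun k => k)).map (fun k => C + k) := by
  apply PySem.List.sorted_eq_of_perm_of_pairwise_lt
  · have hn2 : (PySem.Set.ofList (ks.map (fun k => C + k)) : List Int).Nodup :=
      PySem.Set.nodup_ofList _
    have hn1 : ((PySem.List.sorted (PySem.Set.ofList ks) (fun k => k)).map (fun k => C + k)).Nodup := by
      refine List.Nodup.map (fun a b hab => by omega) ?_
      exact (PySem.List.sorted_perm _ _ _).symm.nodup (PySem.Set.nodup_ofList _)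
    rw [List.perm_ext_iff_of_nodup hn1 hn2]
    intro x
    rw [PySem.Set.mem_ofList]
    constructor
    · intro hx
      obtain ⟨k, hk, rfl⟩ := List.mem_map.mp hx
      rw [PySem.List.mem_sorted, PySem.Set.mem_ofList] at hk
      exact List.mem_map.mpr ⟨k, hk, rfl⟩
    · intro hx
      obtain ⟨k, hk, rfl⟩ := List.mem_map.mp hx
      exact List.mem_map.mpr ⟨k, by rw [PySem.List.mem_sorted, PySem.Set.mem_ofList]; exact hk, rfl⟩
  · refine List.Pairwise.map _ ?_ (PySem.List.sorted_ofList_pairwise_lt ks)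
    intro a b hab
    omega

theorem canon_shift (ws : List (Int × (Int × Int))) (C : Int) :
    canonOf (ws.map (fun p => (C + p.1, p.2))) = canonOf ws := by
  unfold canonOf
  rw [List.map_map]
  have hk : ws.map ((fun x => x.1) ∘ fun p => (C + p.1, p.2))
      = (ws.map (·.1)).map (fun k => C + k) := by
    rw [← List.map_map, List.map_map, List.map_map]
    rfl
  rw [hk, sorted_keys_shift, List.map_map]
  apply List.map_congr_left
  intro k _
  simp [Function.comp, lastW_shift]

theorem B_eval (gl : List Int) (hlen : 2 ≤ gl.length) :
    hlist_alt gl = canonOf (wsB gl) := by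
  have hL := egOf_length gl hlen
  rcases gl with - | ⟨a, - | ⟨b, t⟩⟩
  · simp at hlen
  · simp at hlen
  have hegdef : (a :: b :: t) ++ PySem.List.slice (a :: b :: t) none (some 2)
      = egOf (a :: b :: t) := by
    rw [PySem.List.slice_to _ (by norm_num : (0:Int) ≤ 2)]
    simp [egOf]
  simp only [hlist_alt]
  rw [hegdef]
  have hbnd : PySem.List.len (egOf (a :: b :: t)) - 2 = ((a :: b :: t).length : Int) := by
    rw [PySem.List.len_eq, hL]; push_cast; ring
  rw [hbnd]
  have hr : PySem.List.pyRange 1 (((a :: b :: t).length : Nat) : Int) 2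
      = (List.range ((a :: b :: t).length / 2)).map (fun (k : Nat) => (1 : Int) + 2 * (k : Int)) := by
    rw [PySem.List.pyRange_of_pos _ _ (by norm_num : (0:Int) < 2)]
    have hco : (if (1 : Int) < (((a :: b :: t).length : Nat) : Int)
        then (((((a :: b :: t).length : Nat) : Int) - 1 + 2 - 1) / 2).toNat else 0)
        = (a :: b :: t).length / 2 := by
      split_ifs with h <;> omega
    rw [hco]
  rw [hr, List.map_map]
  have hpairs : (List.range ((a :: b :: t).length / 2)).map
      ((fun i => (PySem.List.pyGetD (egOf (a :: b :: t)) (i + 1) 0,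
        (PySem.List.pyGetD (egOf (a :: b :: t)) i 0,
         PySem.List.pyGetD (egOf (a :: b :: t)) (i + 2) 0))) ∘ (fun (k : Nat) => (1 : Int) + 2 * (k : Int)))
      = wsB (a :: b :: t) := by
    unfold wsB
    have hrange : ((egOf (a :: b :: t)).length - 2) / 2 = (a :: b :: t).length / 2 := by
      rw [hL]; omega
    rw [hrange]
    apply List.map_congr_left
    intro k _
    simp only [Function.comp]
    have h1 : (1 : Int) + 2 * (k : Int) + 1 = ((2 * k + 2 : Nat) : Int) := by push_cast; ring
    have h3 : (1 : Int) + 2 * (k : Int) = ((2 * k + 1 : Nat) : Int) := by push_cast; ring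
    have h4 : ((2 * k + 1 : Nat) : Int) + 2 = ((2 * k + 3 : Nat) : Int) := by push_cast; ring
    rw [h1, PySem.List.pyGetD_natCast, h3, h4, PySem.List.pyGetD_natCast, PySem.List.pyGetD_natCast]
    rfl
  rw [hpairs]
  -- evaluate the reversed dedup fold
  have hfold : ((wsB (a :: b :: t)).reverse.foldl dedupStep
      ((PySem.Set.empty : PySem.Set Int), [])).2 = dedupKey (wsB (a :: b :: t)).reverse := by
    rw [dedup_fold]
    simp [PySem.Set.empty]
  rw [hfold]
  exact B_sorted_eq_canon _

-- ===== VERDICT (by name: the statement is the Claim_ definition above) =====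
theorem hlist_spec : Claim_equal_hlist := by
  intro gl _ hpre
  unfold Spec_hlist
  have hlen := hpre.1
  rw [A_eval gl hpre, B_eval gl hlen]
  have hbnd : ∀ p ∈ wsOf gl, 0 ≤ p.1 ∧ p.1 < ((2 * (egOf gl).length + 1 : Nat) : Int) := by
    intro p hp
    have hb := keys_bounded gl hpre p hp
    constructor
    · exact hb.1
    · have : ((2 * (egOf gl).length + 1 : Nat) : Int) = 2 * ((egOf gl).length : Int) + 1 := by
        push_cast; ring
      rw [this]; exact hb.2
  rw [core_canon (wsOf gl) (2 * (egOf gl).length + 1) hbnd, wsOf_eq_shift, canon_shift]
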